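-- pv_equiv track=rewrite | github.com/zedko/tetrika | task3.py | adjust_intervals_to_lesson
-- ===== SOURCE A (Python) =====
-- def adjust_intervals_to_lesson(intervals: list, start: int, end: int) -> list:
--     """
--     Изменяем начальный и конечный timestamp. Подгоняем под start и end.
--     :param intervals: Массив интервалов, который следует отредактировать
--     :param start: Начало подгонки интервала
--     :param end: Конец подгонки интервала
--     :return: Отредактированный массив интервалов
--     """
--     # Подгонка интервалов к началу занятия
--     intervals_ = []
--     for interval in intervals:
--         time = interval[0]
--         if time < start:  # проверяем начало интервала ко времени старта урока
--             if interval[1] < start:  # проверяем конец этого интервала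
--                 continue  # и сразу идем за следующим, если весь интервал не попадает в урок
--             interval[0] = start  # увеличиваем интервал до start
--         intervals_.append(interval)
--     # Подгонка интервалов к концу занятия
--     intervals__ = []
--     for interval in intervals_:
--         time = interval[1]
--         if time > end:  # проверяем конец интервала
--             if interval[0] > end:  # проверяем конец этого интервала
--                 continue  #
--             interval[1] = end  # уменьшаем интервал до start
--         intervals__.append(interval)
--     return intervals__
-- ===== SOURCE B (Python) =====
-- def _clamp(interval, start, end):
--     """Clamp one interval to [start, end] in place; return None if it falls outside."""
--     if interval[0] < start:
--         if interval[1] < start: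
--             return None
--         interval[0] = start
--     if interval[1] > end:
--         if interval[0] > end:
--             return None
--         interval[1] = end
--     return interval
--
--
-- def adjust_intervals_to_lesson(intervals: list, start: int, end: int) -> list:
--     return [iv for iv in (_clamp(interval, start, end) for interval in intervals) if iv is not None]
-- ===== Notes on version B (the rewrite author's own statement) =====
-- stated objective: simpler
-- what changed: Replaces A's two sequential list-building passes (clamp-to-start, then clamp-to-end over the intermediate list) with a single per-interval clamp helper returning None for dropped intervals, applied once in a comprehension.
import Mathlib
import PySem

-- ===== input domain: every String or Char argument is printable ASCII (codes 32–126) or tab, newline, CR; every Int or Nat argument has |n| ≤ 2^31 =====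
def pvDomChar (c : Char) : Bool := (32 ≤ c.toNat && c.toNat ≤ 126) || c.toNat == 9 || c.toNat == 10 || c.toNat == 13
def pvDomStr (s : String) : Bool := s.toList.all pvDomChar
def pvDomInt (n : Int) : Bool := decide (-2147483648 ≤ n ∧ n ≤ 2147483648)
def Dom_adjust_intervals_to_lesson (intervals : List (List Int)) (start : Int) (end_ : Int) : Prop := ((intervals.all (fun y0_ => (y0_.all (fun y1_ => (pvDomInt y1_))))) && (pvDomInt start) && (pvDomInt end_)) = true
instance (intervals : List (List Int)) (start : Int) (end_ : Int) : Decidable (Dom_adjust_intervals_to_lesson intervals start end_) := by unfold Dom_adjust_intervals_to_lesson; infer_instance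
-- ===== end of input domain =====

-- B is a single-pass rewrite of A's two passes; equivalence is about the RETURN value only
-- (both Pythons mutate the interval lists in place in the same way).

-- ===== PORT A =====
-- pass 1: clamp interval starts to `start`, dropping intervals entirely before it
-- pass 2: clamp interval ends to `end_`, dropping intervals entirely after it
def adjust_intervals_to_lesson (intervals : List (List Int)) (start : Int) (end_ : Int) : List (List Int) :=
  let intervals_ :=
    intervals.foldl (fun acc interval =>
      let time := PySem.List.pyGetD interval 0 0
      if time < start then
        if PySem.List.pyGetD interval 1 0 < start then acc
        else acc ++ [interval.set 0 start]
      else acc ++ [interval]) []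
  intervals_.foldl (fun acc interval =>
    let time := PySem.List.pyGetD interval 1 0
    if time > end_ then
      if PySem.List.pyGetD interval 0 0 > end_ then acc
      else acc ++ [interval.set 1 end_]
    else acc ++ [interval]) []

-- ===== PORT B =====
-- helper `_clamp` of Source B, split after the start-clamp into the end-clamp tail
def pvClampEnd (interval : List Int) (end_ : Int) : Option (List Int) :=
  if PySem.List.pyGetD interval 1 0 > end_ then
    if PySem.List.pyGetD interval 0 0 > end_ then none
    else some (interval.set 1 end_)
  else some interval

def pvClamp (interval : List Int) (start : Int) (end_ : Int) : Option (List Int) :=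
  if PySem.List.pyGetD interval 0 0 < start then
    if PySem.List.pyGetD interval 1 0 < start then none
    else pvClampEnd (interval.set 0 start) end_
  else pvClampEnd interval end_

def adjust_intervals_to_lesson_alt (intervals : List (List Int)) (start : Int) (end_ : Int) : List (List Int) :=
  intervals.filterMap (fun interval => pvClamp interval start end_)

-- ===== PRECONDITION & SPEC =====
-- A indexes interval[0] and interval[1] on every interval, so it raises IndexError
-- exactly when some interval has fewer than two elements; those inputs are excluded.
def Pre_adjust_intervals_to_lesson (intervals : List (List Int)) (start : Int) (end_ : Int) : Prop :=
  ∀ iv ∈ intervals, 2 ≤ iv.length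
instance (intervals : List (List Int)) (start : Int) (end_ : Int) : Decidable (Pre_adjust_intervals_to_lesson intervals start end_) := by unfold Pre_adjust_intervals_to_lesson; infer_instance

def pvWitness_adjust_intervals_to_lesson : List (List Int) × Int × Int := ([[0, 3], [4, 9]], 1, 6)

def Spec_adjust_intervals_to_lesson (intervals : List (List Int)) (start : Int) (end_ : Int) (out : List (List Int)) : Prop := out = adjust_intervals_to_lesson_alt intervals start end_
instance (intervals : List (List Int)) (start : Int) (end_ : Int) (out : List (List Int)) : Decidable (Spec_adjust_intervals_to_lesson intervals start end_ out) := by unfold Spec_adjust_intervals_to_lesson; infer_instance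

-- ===== CLAIM (what is proved, stated in full; the proofs are below) =====
def Claim_equal_adjust_intervals_to_lesson : Prop := ∀ (intervals : List (List Int)) (start : Int) (end_ : Int), Dom_adjust_intervals_to_lesson intervals start end_ → Pre_adjust_intervals_to_lesson intervals start end_ → Spec_adjust_intervals_to_lesson intervals start end_ (adjust_intervals_to_lesson intervals start end_)

-- ===== LEMMAS AND PROOFS =====

-- A's second-pass step on one interval equals B's end-clamp, as a 0/1-element list
theorem pvPass2_step (end_ : Int) (iv : List Int) :
    (if PySem.List.pyGetD iv 1 0 > end_ then
       if PySem.List.pyGetD iv 0 0 > end_ then ([] : List (List Int))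
       else [iv.set 1 end_]
     else [iv]) = (pvClampEnd iv end_).toList := by
  unfold pvClampEnd; split_ifs <;> rfl

-- A's first-pass step followed by flatMapping the second-pass step equals B's clamp
theorem pvStep_eq (start end_ : Int) (iv : List Int) :
    ((if PySem.List.pyGetD iv 0 0 < start then
        if PySem.List.pyGetD iv 1 0 < start then ([] : List (List Int))
        else [iv.set 0 start]
      else [iv]).flatMap (fun iv =>
        (if PySem.List.pyGetD iv 1 0 > end_ then
           if PySem.List.pyGetD iv 0 0 > end_ then ([] : List (List Int))
           else [iv.set 1 end_]
         else [iv]))) = (pvClamp iv start end_).toList := by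
  unfold pvClamp
  split_ifs <;> simp [pvPass2_step]

theorem pvFilterMap_eq_flatMap {α β : Type} (f : α → Option β) (l : List α) :
    l.filterMap f = l.flatMap (fun x => (f x).toList) := by
  induction l with
  | nil => rfl
  | cons x xs ih => cases h : f x <;> simp [h, ih]

theorem adjust_eq (intervals : List (List Int)) (start end_ : Int) :
    adjust_intervals_to_lesson intervals start end_ =
      adjust_intervals_to_lesson_alt intervals start end_ := by
  unfold adjust_intervals_to_lesson adjust_intervals_to_lesson_alt
  have h1 : intervals.foldl (fun acc interval =>
      let time := PySem.List.pyGetD interval 0 0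
      if time < start then
        if PySem.List.pyGetD interval 1 0 < start then acc
        else acc ++ [interval.set 0 start]
      else acc ++ [interval]) [] =
      intervals.flatMap (fun iv =>
        if PySem.List.pyGetD iv 0 0 < start then
          if PySem.List.pyGetD iv 1 0 < start then []
          else [iv.set 0 start]
        else [iv]) := by
    have := PySem.List.foldl_append_eq_flatMap
      (g := fun iv : List Int =>
        if PySem.List.pyGetD iv 0 0 < start then
          if PySem.List.pyGetD iv 1 0 < start then ([] : List (List Int))
          else [iv.set 0 start]
        else [iv]) (l := intervals) (acc := [])
    simp only [List.nil_append] at this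
    have hf : (fun (acc : List (List Int)) (interval : List Int) =>
        let time := PySem.List.pyGetD interval 0 0
        if time < start then
          if PySem.List.pyGetD interval 1 0 < start then acc
          else acc ++ [interval.set 0 start]
        else acc ++ [interval]) = (fun acc x => acc ++
          if PySem.List.pyGetD x 0 0 < start then
            if PySem.List.pyGetD x 1 0 < start then []
            else [x.set 0 start]
          else [x]) := by
      funext acc iv; dsimp only; split_ifs <;> simp
    rw [hf]; exact this
  rw [h1]
  have h2 : ∀ (l : List (List Int)), l.foldl (fun acc interval =>
      let time := PySem.List.pyGetD interval 1 0
      if time > end_ then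
        if PySem.List.pyGetD interval 0 0 > end_ then acc
        else acc ++ [interval.set 1 end_]
      else acc ++ [interval]) [] =
      l.flatMap (fun iv =>
        if PySem.List.pyGetD iv 1 0 > end_ then
          if PySem.List.pyGetD iv 0 0 > end_ then []
          else [iv.set 1 end_]
        else [iv]) := by
    intro l
    have := PySem.List.foldl_append_eq_flatMap
      (g := fun iv : List Int =>
        if PySem.List.pyGetD iv 1 0 > end_ then
          if PySem.List.pyGetD iv 0 0 > end_ then ([] : List (List Int))
          else [iv.set 1 end_]
        else [iv]) (l := l) (acc := [])
    simp only [List.nil_append] at this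
    have hf : (fun (acc : List (List Int)) (interval : List Int) =>
        let time := PySem.List.pyGetD interval 1 0
        if time > end_ then
          if PySem.List.pyGetD interval 0 0 > end_ then acc
          else acc ++ [interval.set 1 end_]
        else acc ++ [interval]) = (fun acc x => acc ++
          if PySem.List.pyGetD x 1 0 > end_ then
            if PySem.List.pyGetD x 0 0 > end_ then []
            else [x.set 1 end_]
          else [x]) := by
      funext acc iv; dsimp only; split_ifs <;> simp
    rw [hf]; exact this
  rw [h2, List.flatMap_assoc]
  rw [pvFilterMap_eq_flatMap]
  apply List.flatMap_congr
  intro iv _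
  exact pvStep_eq start end_ iv

-- ===== VERDICT (by name: the statement is the Claim_ definition above) =====
theorem adjust_intervals_to_lesson_spec : Claim_equal_adjust_intervals_to_lesson := by
  intro intervals start end_ _ _
  exact adjust_eq intervals start end_
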